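-- pv_equiv track=rewrite | github.com/chris-page-gov/mcp-geo | tools/os_mcp.py | _pick_admin_level
-- ===== SOURCE A (Python) =====
-- LEVEL_RANK = {
--     "oa": 0,
--     "lsoa": 1,
--     "msoa": 2,
--     "ward": 3,
--     "parl_const": 4,
--     "local_auth": 5,
--     "built_up_area": 6,
--     "postcode": 7,
-- }
--
-- ADMIN_LEVEL_MAP = {
--     "oa": "OA",
--     "lsoa": "LSOA",
--     "msoa": "MSOA",
--     "ward": "WARD",
--     "local_auth": "DISTRICT",
--     "parl_const": None,
--     "built_up_area": None,
--     "postcode": None,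
-- }
--
-- def _pick_admin_level(levels: list[str]) -> str | None:
--     if not levels:
--         return None
--     ordered = sorted(levels, key=lambda level: LEVEL_RANK.get(level, 99))
--     for level in ordered:
--         mapped = ADMIN_LEVEL_MAP.get(level)
--         if mapped:
--             return mapped
--     return None
-- ===== SOURCE B (Python) =====
-- LEVEL_RANK = {
--     "oa": 0,
--     "lsoa": 1,
--     "msoa": 2,
--     "ward": 3,
--     "parl_const": 4,
--     "local_auth": 5,
--     "built_up_area": 6,
--     "postcode": 7,
-- }
--
-- ADMIN_LEVEL_MAP = {
--     "oa": "OA",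
--     "lsoa": "LSOA",
--     "msoa": "MSOA",
--     "ward": "WARD",
--     "local_auth": "DISTRICT",
--     "parl_const": None,
--     "built_up_area": None,
--     "postcode": None,
-- }
--
-- def _pick_admin_level(levels):
--     best_rank = None
--     best = None
--     for level in levels:
--         mapped = ADMIN_LEVEL_MAP.get(level)
--         if not mapped:
--             continue
--         rank = LEVEL_RANK.get(level, 99)
--         if best_rank is None or rank < best_rank:
--             best_rank, best = rank, mapped
--     return best
-- ===== Notes on version B (the rewrite author's own statement) =====
-- stated objective: simpler
-- what changed: Replaces sort-then-scan with a single pass that keeps the mapped value of the lowest-rank truthy-mapped level seen so far.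
import Mathlib
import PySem

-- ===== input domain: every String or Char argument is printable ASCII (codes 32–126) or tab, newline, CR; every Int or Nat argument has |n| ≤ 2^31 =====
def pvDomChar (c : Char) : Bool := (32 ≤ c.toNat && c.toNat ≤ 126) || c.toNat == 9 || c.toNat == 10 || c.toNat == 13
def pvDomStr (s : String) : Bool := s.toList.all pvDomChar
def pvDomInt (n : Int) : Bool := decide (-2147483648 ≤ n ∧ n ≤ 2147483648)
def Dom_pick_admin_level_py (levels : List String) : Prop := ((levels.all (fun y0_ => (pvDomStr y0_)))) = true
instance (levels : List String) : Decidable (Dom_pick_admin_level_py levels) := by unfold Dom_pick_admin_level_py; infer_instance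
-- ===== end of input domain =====

-- B replaces A's sort-then-scan with a single pass keeping the lowest-rank truthy-mapped
-- level seen so far (objective: simpler, O(n) instead of O(n log n)).

-- ===== PORT A =====
def levelRank : PySem.Dict String Int :=
  PySem.Dict.ofList [("oa", 0), ("lsoa", 1), ("msoa", 2), ("ward", 3),
                     ("parl_const", 4), ("local_auth", 5), ("built_up_area", 6), ("postcode", 7)]

def adminMap : PySem.Dict String (Option String) :=
  PySem.Dict.ofList [("oa", some "OA"), ("lsoa", some "LSOA"), ("msoa", some "MSOA"),
                     ("ward", some "WARD"), ("local_auth", some "DISTRICT"),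
                     ("parl_const", none), ("built_up_area", none), ("postcode", none)]

-- the 'for level in ordered: … return mapped' loop of A
def pickScan : List String → Option String
  | [] => none
  | level :: rest =>
    match (adminMap.get? level).join with      -- mapped = ADMIN_LEVEL_MAP.get(level)
    | some s => if s = "" then pickScan rest else some s   -- if mapped: return mapped
    | none => pickScan rest

def pick_admin_level_py (levels : List String) : Option String :=
  if levels = [] then none
  else pickScan (PySem.List.sorted levels (fun level => levelRank.getD level 99) false)

-- ===== PORT B =====
-- loop body of B: state = (best_rank, best)
def pickStep (st : Option Int × Option String) (level : String) : Option Int × Option String :=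
  match (adminMap.get? level).join with
  | none => st                                   -- if not mapped: continue
  | some mapped =>
    if mapped = "" then st
    else
      let rank := levelRank.getD level 99
      match st.1 with
      | none => (some rank, some mapped)
      | some br => if rank < br then (some rank, some mapped) else st

def pick_admin_level_py_alt (levels : List String) : Option String :=
  (levels.foldl pickStep ((none : Option Int), (none : Option String))).2

-- ===== PRECONDITION & SPEC =====
def Spec_pick_admin_level_py (levels : List String) (out : Option String) : Prop := out = pick_admin_level_py_alt levels
instance (levels : List String) (out : Option String) : Decidable (Spec_pick_admin_level_py levels out) := by unfold Spec_pick_admin_level_py; infer_instance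

-- ===== CLAIM (what is proved, stated in full; the proofs are below) =====
def Claim_equal_pick_admin_level_py : Prop := ∀ (levels : List String), Dom_pick_admin_level_py levels → Spec_pick_admin_level_py levels (pick_admin_level_py levels)

-- ===== LEMMAS AND PROOFS =====

-- proof-only helpers: the "class" of a level (its rank, if its admin mapping is truthy)
def cls (l : String) : Option Int :=
  if l = "oa" then some 0 else if l = "lsoa" then some 1 else if l = "msoa" then some 2
  else if l = "ward" then some 3 else if l = "local_auth" then some 5 else none

def tblS (r : Int) : String :=
  if r = 0 then "OA" else if r = 1 then "LSOA" else if r = 2 then "MSOA"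
  else if r = 3 then "WARD" else "DISTRICT"

def minR (levels : List String) : Int := (levels.filterMap cls).foldl min 999

def outOf (m : Int) : Option String := if m = 999 then none else some (tblS m)

lemma mj_char (l : String) : (adminMap.get? l).join = (cls l).map tblS := by
  rcases eq_or_ne l "oa" with h | h0; · subst h; rfl
  rcases eq_or_ne l "lsoa" with h | h1; · subst h; rfl
  rcases eq_or_ne l "msoa" with h | h2; · subst h; rfl
  rcases eq_or_ne l "ward" with h | h3; · subst h; rfl
  rcases eq_or_ne l "local_auth" with h | h4; · subst h; rfl
  rcases eq_or_ne l "parl_const" with h | h5; · subst h; rfl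
  rcases eq_or_ne l "built_up_area" with h | h6; · subst h; rfl
  rcases eq_or_ne l "postcode" with h | h7; · subst h; rfl
  have g0 : (("oa" : String) == l) = false := beq_eq_false_iff_ne.mpr (Ne.symm h0)
  have g1 : (("lsoa" : String) == l) = false := beq_eq_false_iff_ne.mpr (Ne.symm h1)
  have g2 : (("msoa" : String) == l) = false := beq_eq_false_iff_ne.mpr (Ne.symm h2)
  have g3 : (("ward" : String) == l) = false := beq_eq_false_iff_ne.mpr (Ne.symm h3)
  have g4 : (("local_auth" : String) == l) = false := beq_eq_false_iff_ne.mpr (Ne.symm h4)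
  have g5 : (("parl_const" : String) == l) = false := beq_eq_false_iff_ne.mpr (Ne.symm h5)
  have g6 : (("built_up_area" : String) == l) = false := beq_eq_false_iff_ne.mpr (Ne.symm h6)
  have g7 : (("postcode" : String) == l) = false := beq_eq_false_iff_ne.mpr (Ne.symm h7)
  simp [adminMap, cls, PySem.Dict.ofList, PySem.Dict.update, PySem.Dict.insert, PySem.Dict.get?, PySem.Dict.empty, List.find?, h0, h1, h2, h3, h4, g0, g1, g2, g3, g4, g5, g6, g7]

lemma cls_spec {l : String} {r : Int} (h : cls l = some r) :
    levelRank.getD l 99 = r ∧ tblS r ≠ "" ∧ 0 ≤ r ∧ r < 999 := by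
  unfold cls at h
  split_ifs at h with h1 h2 h3 h4 h5 <;>
    (cases h; subst_vars; exact ⟨by rfl, by decide, by decide, by decide⟩)

lemma foldl_min_perm {xs ys : List Int} (h : xs.Perm ys) : ∀ a : Int, xs.foldl min a = ys.foldl min a := by
  induction h with
  | nil => intro a; rfl
  | cons x _ ih => intro a; simpa using ih (min a x)
  | swap x y l => intro a; simp only [List.foldl]; rw [min_right_comm]
  | trans _ _ ih1 ih2 => intro a; rw [ih1, ih2]

lemma foldl_min_of_le {xs : List Int} {a : Int} (h : ∀ x ∈ xs, a ≤ x) : xs.foldl min a = a := by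
  induction xs with
  | nil => rfl
  | cons x t ih =>
    simp only [List.foldl]
    rw [min_eq_left (h x (by simp))]
    exact ih (fun y hy => h y (by simp [hy]))

lemma foldl_min_le_init (xs : List Int) (a : Int) : xs.foldl min a ≤ a := by
  induction xs generalizing a with
  | nil => simp
  | cons x t ih => exact le_trans (ih (min a x)) (min_le_left a x)

lemma scan_sorted : ∀ l : List String,
    l.Pairwise (fun x y => levelRank.getD x 99 ≤ levelRank.getD y 99) →
    pickScan l = outOf (minR l) := by
  intro l hp
  induction l with
  | nil => rfl
  | cons a t ih =>
    rcases List.pairwise_cons.mp hp with ⟨h1, h2⟩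
    cases hc : cls a with
    | none =>
      have hmj := mj_char a
      rw [hc] at hmj
      simp only [pickScan, hmj, Option.map_none]
      rw [ih h2]
      unfold minR
      simp [hc]
    | some r =>
      obtain ⟨hk, hne, hr0, hr⟩ := cls_spec hc
      have hmj := mj_char a
      rw [hc] at hmj
      simp only [pickScan, hmj, Option.map_some, if_neg hne]
      have hmin : minR (a :: t) = r := by
        unfold minR
        simp only [List.filterMap_cons, hc, List.foldl]
        rw [min_eq_right (le_of_lt hr)]
        apply foldl_min_of_le
        intro x hx
        rcases List.mem_filterMap.mp hx with ⟨b, hb, hcb⟩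
        have := (cls_spec hcb).1
        have hab := h1 b hb
        rw [hk, this] at hab
        exact hab
      rw [hmin]
      unfold outOf
      rw [if_neg (by omega)]

lemma foldB_some : ∀ (t : List String) (r : Int), r < 999 →
    t.foldl pickStep (some r, some (tblS r)) = (some ((t.filterMap cls).foldl min r), some (tblS ((t.filterMap cls).foldl min r))) := by
  intro t
  induction t with
  | nil => intro r _; rfl
  | cons b t ih =>
    intro r hr
    cases hc : cls b with
    | none =>
      have hmj := mj_char b
      rw [hc] at hmj
      simp only [List.foldl, pickStep, hmj, Option.map_none]
      rw [ih r hr]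
      simp [hc]
    | some rb =>
      obtain ⟨hk, hne, hrb0, hrb⟩ := cls_spec hc
      have hmj := mj_char b
      rw [hc] at hmj
      simp only [List.foldl, pickStep, hmj, Option.map_some, if_neg hne, hk]
      have hstate : (if rb < r then ((some rb : Option Int), (some (tblS rb) : Option String)) else (some r, some (tblS r)))
          = (some (min r rb), some (tblS (min r rb))) := by
        by_cases h : rb < r
        · rw [if_pos h, min_eq_right (le_of_lt h)]
        · rw [if_neg h, min_eq_left (by omega)]
      rw [hstate, ih (min r rb) (by omega)]
      simp [hc]

lemma foldB_none : ∀ t : List String, (t.foldl pickStep (none, none)).2 = outOf (minR t) := by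
  intro t
  induction t with
  | nil => rfl
  | cons b t ih =>
    cases hc : cls b with
    | none =>
      have hmj := mj_char b
      rw [hc] at hmj
      simp only [List.foldl, pickStep, hmj, Option.map_none]
      rw [ih]
      unfold minR
      simp [hc]
    | some rb =>
      obtain ⟨hk, hne, hrb0, hrb⟩ := cls_spec hc
      have hmj := mj_char b
      rw [hc] at hmj
      simp only [List.foldl, pickStep, hmj, Option.map_some, if_neg hne, hk]
      rw [foldB_some t rb hrb]
      have hle : (t.filterMap cls).foldl min rb ≤ rb := foldl_min_le_init _ _
      have hmin : minR (b :: t) = (t.filterMap cls).foldl min rb := by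
        unfold minR
        simp only [List.filterMap_cons, hc, List.foldl]
        rw [min_eq_right (le_of_lt hrb)]
      rw [hmin]
      unfold outOf
      rw [if_neg (by omega)]

-- ===== VERDICT (by name: the statement is the Claim_ definition above) =====
theorem pick_admin_level_py_spec : Claim_equal_pick_admin_level_py := by
  intro levels _
  unfold Spec_pick_admin_level_py pick_admin_level_py pick_admin_level_py_alt
  rw [foldB_none]
  by_cases hnil : levels = []
  · subst hnil; rfl
  · rw [if_neg hnil]
    rw [scan_sorted _ (PySem.List.sorted_pairwise levels _)]
    have hperm : ((PySem.List.sorted levels (fun level => levelRank.getD level 99) false).filterMap cls).Perm (levels.filterMap cls) :=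
      (PySem.List.sorted_perm levels _ _).filterMap cls
    unfold minR
    rw [foldl_min_perm hperm]
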